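-- pv_equiv track=rewrite | github.com/nigelgalbraith/portfolio.github.io | projects/files/ThematicAnalysis/Python-Files/clean-JSON-Data.py | wrap_sub_keys
-- ===== SOURCE A (Python) =====
-- def wrap_sub_keys(item, sub_key_fields):
--     """Wrap aligned items from list fields into structured dictionaries."""
--     lists = [item.get(k, []) if isinstance(item.get(k, []), list) else [] for k in sub_key_fields]
--     if not any(lists):
--         return []
--     min_len = min(len(lst) for lst in lists if lst)
--     wrapped = []
--     for i in range(min_len):
--         entry = {field: lists[j][i] if i < len(lists[j]) else "" for j, field in enumerate(sub_key_fields)}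
--         wrapped.append(entry)
--     return wrapped
-- ===== SOURCE B (Python) =====
-- def wrap_sub_keys(item, sub_key_fields):
--     """Wrap aligned items from list fields into structured dictionaries."""
--     lists = [item.get(k, []) if isinstance(item.get(k, []), list) else [] for k in sub_key_fields]
--     non_empty = [lst for lst in lists if lst]
--     if not non_empty:
--         return []
--     min_len = min(map(len, non_empty))
--     columns = [lst if lst else [""] * min_len for lst in lists]
--     return [dict(zip(sub_key_fields, row)) for row in zip(*columns)]
-- ===== Notes on version B (the rewrite author's own statement) =====
-- stated objective: idiomatic
-- what changed: Replaces the explicit i/j index loop with an entry-dict comprehension by a column-build-then-transpose decomposition: pad empty lists to min_len with "" and emit [dict(zip(sub_key_fields, row)) for row in zip(*columns)], letting zip truncate at min_len.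
import Mathlib
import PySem

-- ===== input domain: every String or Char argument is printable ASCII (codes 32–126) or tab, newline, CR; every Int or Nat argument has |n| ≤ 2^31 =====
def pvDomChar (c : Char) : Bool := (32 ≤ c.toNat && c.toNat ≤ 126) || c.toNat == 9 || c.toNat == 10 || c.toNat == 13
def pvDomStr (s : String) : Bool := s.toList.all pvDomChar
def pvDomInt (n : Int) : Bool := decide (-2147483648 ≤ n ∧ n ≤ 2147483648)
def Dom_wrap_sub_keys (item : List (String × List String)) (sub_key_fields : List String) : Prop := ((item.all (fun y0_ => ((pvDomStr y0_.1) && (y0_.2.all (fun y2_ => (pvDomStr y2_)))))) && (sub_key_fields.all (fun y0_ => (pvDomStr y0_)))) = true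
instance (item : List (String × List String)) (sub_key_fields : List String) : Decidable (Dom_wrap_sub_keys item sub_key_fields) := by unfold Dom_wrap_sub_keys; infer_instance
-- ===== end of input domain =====

-- B replaces A's explicit i/j index loop by a build-padded-columns-then-transpose decomposition (idiomatic; same cost).

-- ===== PORT A =====
def wrap_sub_keys (item : List (String × List String)) (sub_key_fields : List String) : List (List (String × String)) :=
  let lists := sub_key_fields.map (fun k => PySem.Dict.getD (PySem.Dict.mk item) k [])
  if lists.any (fun l => !l.isEmpty) then
    -- min(len(lst) for lst in lists if lst); the generator is non-empty under the guard, so the .getD 0 default is never used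
    let min_len : Int := (((lists.filter (fun l => !l.isEmpty)).map (fun l => (l.length : Int))).min?).getD 0
    (PySem.List.pyRange 0 min_len 1).map (fun i =>
      ((PySem.List.enumerate sub_key_fields).foldl (fun d p =>
          PySem.Dict.insert d p.2
            (if i < ((PySem.List.pyGetD lists p.1 []).length : Int)
             then PySem.List.pyGetD (PySem.List.pyGetD lists p.1 []) i "" else ""))
        PySem.Dict.empty).items)
  else []

-- ===== PORT B =====
-- zip(*cols): one row per index below the length of the shortest column
def pyZipRows (cols : List (List String)) : List (List String) :=
  match cols with
  | [] => []
  | c :: cs =>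
    let m := cs.foldl (fun acc l => Nat.min acc l.length) c.length
    (List.range m).map (fun i => (c :: cs).map (fun l => l.getD i ""))

def wrap_sub_keys_alt (item : List (String × List String)) (sub_key_fields : List String) : List (List (String × String)) :=
  let lists := sub_key_fields.map (fun k => PySem.Dict.getD (PySem.Dict.mk item) k [])
  let nonEmpty := lists.filter (fun l => !l.isEmpty)
  if nonEmpty.isEmpty then []
  else
    let min_len : Nat := ((nonEmpty.map List.length).min?).getD 0
    let columns := lists.map (fun l => if l.isEmpty then List.replicate min_len "" else l)
    (pyZipRows columns).map (fun row =>
      ((sub_key_fields.zip row).foldl (fun d kv => PySem.Dict.insert d kv.1 kv.2) PySem.Dict.empty).items)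

-- ===== PRECONDITION & SPEC =====
def Spec_wrap_sub_keys (item : List (String × List String)) (sub_key_fields : List String) (out : List (List (String × String))) : Prop := out = wrap_sub_keys_alt item sub_key_fields
instance (item : List (String × List String)) (sub_key_fields : List String) (out : List (List (String × String))) : Decidable (Spec_wrap_sub_keys item sub_key_fields out) := by unfold Spec_wrap_sub_keys; infer_instance

-- ===== CLAIM (what is proved, stated in full; the proofs are below) =====
def Claim_equal_wrap_sub_keys : Prop := ∀ (item : List (String × List String)) (sub_key_fields : List String), Dom_wrap_sub_keys item sub_key_fields → Spec_wrap_sub_keys item sub_key_fields (wrap_sub_keys item sub_key_fields)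

-- ===== LEMMAS AND PROOFS =====

theorem foldl_min_len_cast (x : Nat) (xs : List (List String)) :
    List.foldl min ((x : Int)) (xs.map (fun l => (l.length : Int)))
      = ((List.foldl min x (xs.map List.length) : Nat) : Int) := by
  induction xs generalizing x with
  | nil => simp
  | cons y ys ih =>
    rw [List.map_cons, List.map_cons, List.foldl_cons, List.foldl_cons, ← Nat.cast_min]
    exact ih (min x y.length)

theorem min_getD_cast (E : List (List String)) :
    ((E.map (fun l => (l.length : Int))).min?).getD 0 = (((E.map List.length).min?).getD 0 : Nat) := by
  cases E with
  | nil => rfl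
  | cons x xs =>
    rw [List.map_cons, List.map_cons, List.min?_cons', List.min?_cons',
      Option.getD_some, Option.getD_some]
    exact foldl_min_len_cast x.length xs

theorem pyZipRows_cons (c : List String) (cs : List (List String)) :
    pyZipRows (c :: cs) =
      (List.range ((((c :: cs).map List.length).min?).getD 0)).map
        (fun i => (c :: cs).map (fun l => l.getD i "")) := by
  have h : cs.foldl (fun acc l => Nat.min acc l.length) c.length
      = (cs.map List.length).foldl min c.length := (List.foldl_map).symm
  have h2 : (((c :: cs).map List.length).min?).getD 0
      = (cs.map List.length).foldl min c.length := by
    rw [List.map_cons, List.min?_cons', Option.getD_some]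
  show (List.range (cs.foldl (fun acc l => Nat.min acc l.length) c.length)).map
      (fun i => (c :: cs).map (fun l => l.getD i "")) = _
  rw [h2, h]

theorem pyZipRows_map_cons (pad : List String → List String) (a : List String)
    (as : List (List String)) :
    pyZipRows ((a :: as).map pad)
      = (List.range (((((a :: as).map pad).map List.length).min?).getD 0)).map
        (fun i => ((a :: as).map pad).map (fun l => l.getD i "")) := by
  rw [List.map_cons, pyZipRows_cons]

theorem entry_eq (fields : List String) (lists : List (List String))
    (hlen : lists.length = fields.length) (v : Nat)
    (hle : ∀ l ∈ lists, l.isEmpty = false → v ≤ l.length)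
    (k : Nat) (hk : k < v) :
    ((PySem.List.enumerate fields).foldl (fun d p =>
        PySem.Dict.insert d p.2
          (if (0 + (k : Int)) < ((PySem.List.pyGetD lists p.1 []).length : Int)
           then PySem.List.pyGetD (PySem.List.pyGetD lists p.1 []) (0 + (k : Int)) "" else ""))
      PySem.Dict.empty).items
    =
    ((fields.zip ((lists.map (fun l => if l.isEmpty then List.replicate v "" else l)).map
        (fun l => l.getD k ""))).foldl
      (fun d kv => PySem.Dict.insert d kv.1 kv.2) PySem.Dict.empty).items := by
  have hmap : (PySem.List.enumerate fields).map
      (fun p : Int × String => (p.2,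
        if (0 + (k : Int)) < ((PySem.List.pyGetD lists p.1 []).length : Int)
        then PySem.List.pyGetD (PySem.List.pyGetD lists p.1 []) (0 + (k : Int)) "" else ""))
      = fields.zip ((lists.map (fun l => if l.isEmpty then List.replicate v "" else l)).map
          (fun l => l.getD k "")) := by
    apply List.ext_getElem
    · simp [PySem.List.length_enumerate, hlen]
    · intro j h1 h2
      simp only [List.getElem_map, List.getElem_zip, PySem.List.getElem_enumerate]
      have hj : j < lists.length := by
        simp only [List.length_map, PySem.List.length_enumerate] at h1
        omega
      have hget : PySem.List.pyGetD lists (0 + (j : Int)) [] = lists[j] := by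
        rw [zero_add, PySem.List.pyGetD_natCast, List.getD_eq_getElem lists [] hj]
      refine Prod.ext rfl ?_
      simp only [hget]
      by_cases he : lists[j].isEmpty
      · have hnil : lists[j] = [] := List.isEmpty_iff.mp he
        rw [if_neg (by rw [hnil]; simp), if_pos he]
        simp [List.getD, hk]
      · have hvle : v ≤ lists[j].length := hle _ (List.getElem_mem hj) (by simpa using he)
        have hklt : k < lists[j].length := lt_of_lt_of_le hk hvle
        rw [if_pos (by omega), if_neg he, zero_add, PySem.List.pyGetD_natCast]
  calc ((PySem.List.enumerate fields).foldl (fun d p =>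
        PySem.Dict.insert d p.2
          (if (0 + (k : Int)) < ((PySem.List.pyGetD lists p.1 []).length : Int)
           then PySem.List.pyGetD (PySem.List.pyGetD lists p.1 []) (0 + (k : Int)) "" else ""))
      PySem.Dict.empty).items
      = (((PySem.List.enumerate fields).map
          (fun p : Int × String => (p.2,
            if (0 + (k : Int)) < ((PySem.List.pyGetD lists p.1 []).length : Int)
            then PySem.List.pyGetD (PySem.List.pyGetD lists p.1 []) (0 + (k : Int)) "" else ""))).foldl
          (fun d kv => PySem.Dict.insert d kv.1 kv.2) PySem.Dict.empty).items := by
        rw [List.foldl_map]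
    _ = _ := by rw [hmap]

theorem main_core (fields : List String) (lists : List (List String))
    (hlen : lists.length = fields.length) :
    (if lists.any (fun l => !l.isEmpty) then
      (PySem.List.pyRange 0
          ((((lists.filter (fun l => !l.isEmpty)).map (fun l => (l.length : Int))).min?).getD 0) 1).map
        (fun i =>
          ((PySem.List.enumerate fields).foldl (fun d p =>
              PySem.Dict.insert d p.2
                (if i < ((PySem.List.pyGetD lists p.1 []).length : Int)
                 then PySem.List.pyGetD (PySem.List.pyGetD lists p.1 []) i "" else ""))
            PySem.Dict.empty).items)
     else [])
    =
    (if (lists.filter (fun l => !l.isEmpty)).isEmpty then []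
     else
      (pyZipRows (lists.map (fun l =>
          if l.isEmpty then
            List.replicate ((((lists.filter (fun l => !l.isEmpty)).map List.length).min?).getD 0) ""
          else l))).map (fun row =>
        ((fields.zip row).foldl (fun d kv => PySem.Dict.insert d kv.1 kv.2) PySem.Dict.empty).items)) := by
  by_cases hany : lists.any (fun l => !l.isEmpty) = true
  · rw [if_pos hany]
    have hEne : lists.filter (fun l => !l.isEmpty) ≠ [] := by
      obtain ⟨l0, hl0, hp⟩ := List.any_eq_true.mp hany
      intro hf
      have : l0 ∈ lists.filter (fun l => !l.isEmpty) := List.mem_filter.mpr ⟨hl0, hp⟩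
      rw [hf] at this; cases this
    rw [if_neg (by simpa [List.isEmpty_iff] using hEne)]
    obtain ⟨v, hv⟩ : ∃ v, ((lists.filter (fun l => !l.isEmpty)).map List.length).min? = some v := by
      cases hE : lists.filter (fun l => !l.isEmpty) with
      | nil => exact absurd hE hEne
      | cons e es => exact ⟨_, List.min?_cons'⟩
    obtain ⟨hvmem, hvle⟩ := List.min?_eq_some_iff.mp hv
    have hminD : (((lists.filter (fun l => !l.isEmpty)).map List.length).min?).getD 0 = v := by
      rw [hv]; rfl
    have hIntD : ((((lists.filter (fun l => !l.isEmpty)).map (fun l => (l.length : Int))).min?).getD 0)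
        = (v : Int) := by
      have h2 := min_getD_cast (lists.filter (fun l => !l.isEmpty))
      rw [hminD] at h2
      exact h2
    have hle : ∀ l ∈ lists, l.isEmpty = false → v ≤ l.length := by
      intro l hl hne
      exact hvle _ (List.mem_map_of_mem (List.mem_filter.mpr ⟨hl, by simp [hne]⟩))
    rw [hminD, hIntD, PySem.List.pyRange_one]
    cases lists with
    | nil => exact absurd rfl hEne
    | cons a as =>
      rw [pyZipRows_map_cons]
      have hcolmin : ((((a :: as).map
            (fun l => if l.isEmpty then List.replicate v "" else l)).map List.length).min?).getD 0
          = v := by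
        obtain ⟨M, hM⟩ : ∃ M, (((a :: as).map (fun l => if l.isEmpty then List.replicate v "" else l)).map
            List.length).min? = some M := ⟨_, by rw [List.map_cons, List.map_cons]; exact List.min?_cons'⟩
        obtain ⟨hMmem, hMle⟩ := List.min?_eq_some_iff.mp hM
        have hge : v ≤ M := by
          obtain ⟨c, hc, hcM⟩ := List.mem_map.mp hMmem
          obtain ⟨l, hl, hlc⟩ := List.mem_map.mp hc
          subst hcM; subst hlc
          by_cases he : l.isEmpty
          · simp [he]
          · have := hle l hl (by simpa using he)
            simpa [he] using this
        have hle2 : M ≤ v := by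
          obtain ⟨l, hl, hlv⟩ := List.mem_map.mp hvmem
          have hlne : l.isEmpty = false := by
            have := (List.mem_filter.mp hl).2; simpa using this
          have hlin : l ∈ (a :: as) := (List.mem_filter.mp hl).1
          refine hMle v ?_
          refine List.mem_map.mpr ⟨l, List.mem_map.mpr ⟨l, hlin, by simp [hlne]⟩, hlv⟩
        rw [hM]
        exact le_antisymm hle2 hge
      rw [hcolmin]
      simp only [sub_zero, Int.toNat_natCast, List.map_map]
      apply List.map_congr_left
      intro k hk
      have hkv : k < v := List.mem_range.mp hk
      simpa [Function.comp] using entry_eq fields (a :: as) hlen v hle k hkv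
  · rw [if_neg hany]
    have hfil : lists.filter (fun l => !l.isEmpty) = [] := by
      rw [List.filter_eq_nil_iff]
      intro l hl hp
      exact hany (List.any_eq_true.mpr ⟨l, hl, hp⟩)
    rw [if_pos (by simp [hfil])]

-- ===== VERDICT (by name: the statement is the Claim_ definition above) =====
theorem wrap_sub_keys_spec : Claim_equal_wrap_sub_keys := by
  intro item fields _
  show wrap_sub_keys item fields = wrap_sub_keys_alt item fields
  exact main_core fields (fields.map (fun k => PySem.Dict.getD (PySem.Dict.mk item) k []))
    (by simp)
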